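-- pv_equiv track=rewrite | github.com/mlo31415/FanzineIssueSpecPackage | FanzineDateTime.py | BoundDay
-- ===== SOURCE A (Python) =====
-- def MonthLength(m: int) -> int:
--     if m == 2:   # This messes up leap years. De minimus
--         return 28
--     if m in [4, 6, 9, 11]:
--         return 30
--     if m in [1, 3, 5, 7, 8, 10, 12]:
--         return 31
--
-- def BoundDay(d: int|None, m: int|None, y: int|None) -> tuple[int|None, int|None, int|None]:
--     if d is None:
--         return None, None, None
--     if m is None:    # Should never happen!
--         return None, None, None
--
--     if d < -10 or d > 60:   # Dates this far off the month are more probably typos than deliberate.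
--         return None, None, None
--
--     # Deal with the normal case
--     if 1 <= d <= MonthLength(m):
--         return d, m, y
--
--     # Deal with negative days
--     if d < 1:
--         while d < 1:
--             m=m-1
--             if m < 1:
--                 m=12
--                 y=y-1
--             d=d+MonthLength(m)
--         return d, m, y
--
--     # The day is past the end of the month.  Move it to the next month.
--     while d > MonthLength(m):
--         d=d-MonthLength(m)
--         m=m+1
--         if m > 12:
--             m=1
--             y=y+1
--
--     return d, m, y
-- ===== SOURCE B (Python) =====
-- _CUM = [0, 31, 59, 90, 120, 151, 181, 212, 243, 273, 304, 334]   # days before month i+1 (Feb always 28)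
--
-- def _resolve(d, m):
--     # Closed form: map (month, day) to a day offset t in a fixed 365-day year
--     # plus a year shift, then read month and day back from the cumulative table.
--     t = 365 * ((m - 1) // 12) + _CUM[(m - 1) % 12] + d - 1
--     shift, t = divmod(t, 365)
--     i = sum(1 for c in _CUM if c <= t) - 1
--     return t - _CUM[i] + 1, i + 1, shift
--
-- def BoundDay(d, m, y):
--     if d is None or m is None:
--         return None, None, None
--     if d < -10 or d > 60:
--         return None, None, None
--     day, month, shift = _resolve(d, m)
--     if y is not None:
--         y += shift
--     return day, month, y
-- ===== Notes on version B (the rewrite author's own statement) =====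
-- stated objective: alternative
-- what changed: Replaces A's normalize-by-iterated-month-borrow/carry loops with a closed-form computation: the (month, day) pair is mapped to a day offset in a fixed 365-day year via a cumulative month-length table, divmod by 365 gives the year shift, and month/day are read back from the table; no normalization loop remains.
-- intended difference: For day < 1 with month <= 0, A borrows into December and subtracts exactly one year no matter how far below 1 the month is, while B's calendar arithmetic returns the true preceding month and year (e.g. month 0 day 0 is normalized to the last day of November of the previous year), which is the intended normalization. — e.g. on BoundDay(some 0, some 0, some 2000): A returns (some 31, some 12, some 1999), B returns (some 30, some 11, some 1999)
import Mathlib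
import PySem

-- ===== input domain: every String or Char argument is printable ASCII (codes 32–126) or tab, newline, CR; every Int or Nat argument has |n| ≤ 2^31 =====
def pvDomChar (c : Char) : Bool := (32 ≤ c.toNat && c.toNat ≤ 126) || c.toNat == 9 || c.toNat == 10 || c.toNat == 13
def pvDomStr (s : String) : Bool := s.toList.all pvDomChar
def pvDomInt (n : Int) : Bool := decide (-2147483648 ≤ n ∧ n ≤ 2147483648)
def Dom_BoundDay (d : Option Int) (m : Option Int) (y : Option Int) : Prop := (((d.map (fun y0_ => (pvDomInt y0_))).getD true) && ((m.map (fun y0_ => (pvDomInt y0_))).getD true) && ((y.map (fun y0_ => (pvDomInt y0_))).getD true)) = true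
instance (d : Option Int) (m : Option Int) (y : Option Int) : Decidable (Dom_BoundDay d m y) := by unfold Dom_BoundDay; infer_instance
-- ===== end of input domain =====

-- B replaces A's borrow/carry month loops by a closed-form computation over a
-- cumulative month-length table (objective: alternative algorithm, same cost).

-- ===== PORT A =====
-- MonthLength: Python returns None for a month outside 1..12 and the caller then
-- raises TypeError; Pre_BoundDay excludes every input reaching that case, so the
-- final branch's value (31) is never relevant to the claim.
def monthLength (m : Int) : Int :=
  if m = 2 then 28
  else if m = 4 ∨ m = 6 ∨ m = 9 ∨ m = 11 then 30
  else if m = 1 ∨ m = 3 ∨ m = 5 ∨ m = 7 ∨ m = 8 ∨ m = 10 ∨ m = 12 then 31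
  else 31

-- A's "while d < 1" loop (fuel only makes the recursion total; under Pre_ the
-- loop exits within the fuel).  Python's y=y-1 raises if y is None; Pre_ excludes that.
def negLoopA : Nat → Int → Int → Option Int → Option Int × Option Int × Option Int
  | 0, d, m, y => (some d, some m, y)
  | f+1, d, m, y =>
    if d < 1 then
      let m1 := m - 1
      let p := if m1 < 1 then ((12 : Int), y.map (fun v => v - 1)) else (m1, y)
      negLoopA f (d + monthLength p.1) p.1 p.2
    else (some d, some m, y)

-- A's "while d > MonthLength(m)" loop.
def posLoopA : Nat → Int → Int → Option Int → Option Int × Option Int × Option Int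
  | 0, d, m, y => (some d, some m, y)
  | f+1, d, m, y =>
    if d > monthLength m then
      let d1 := d - monthLength m
      let m1 := m + 1
      let p := if m1 > 12 then ((1 : Int), y.map (fun v => v + 1)) else (m1, y)
      posLoopA f d1 p.1 p.2
    else (some d, some m, y)

def BoundDay (d : Option Int) (m : Option Int) (y : Option Int) : Option Int × Option Int × Option Int :=
  match d with
  | none => (none, none, none)
  | some dv =>
    match m with
    | none => (none, none, none)
    | some mv =>
      if dv < -10 ∨ dv > 60 then (none, none, none)
      else if 1 ≤ dv ∧ dv ≤ monthLength mv then (some dv, some mv, y)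
      else if dv < 1 then negLoopA 100 dv mv y
      else posLoopA 100 dv mv y

-- ===== PORT B =====
-- _CUM: days before month i+1 in a fixed 365-day year (Feb always 28).
def cumB : List Int := [0, 31, 59, 90, 120, 151, 181, 212, 243, 273, 304, 334]

-- Source B's _resolve: closed form — (month, day) ↦ day offset t in a 365-day year
-- plus a year shift; month and day are read back from the cumulative table.
-- The two list indices (m-1)%12 and i are provably in 0..11, so .getD 0 is exact.
def resolveB (d : Int) (m : Int) : Int × Int × Int :=
  let t := 365 * (PySem.Int.floordiv (m - 1) 12) +
           (PySem.List.pyGet? cumB (PySem.Int.mod (m - 1) 12)).getD 0 + d - 1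
  let shift := PySem.Int.floordiv t 365
  let t2 := PySem.Int.mod t 365
  let i := (cumB.foldl (fun a c => a + if c ≤ t2 then 1 else 0) 0) - 1
  (t2 - (PySem.List.pyGet? cumB i).getD 0 + 1, i + 1, shift)

def BoundDay_alt (d : Option Int) (m : Option Int) (y : Option Int) : Option Int × Option Int × Option Int :=
  match d, m with
  | none, _ => (none, none, none)
  | _, none => (none, none, none)
  | some dv, some mv =>
    if dv < -10 ∨ dv > 60 then (none, none, none)
    else
      let r := resolveB dv mv
      (some r.1, some r.2.1, y.map (fun v => v + r.2.2))

-- ===== PRECONDITION & SPEC =====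
-- Pre_ excludes exactly the inputs on which Python A raises TypeError: a month
-- whose (possibly borrowed) MonthLength is None, or y = None when a year wrap occurs.
def Pre_BoundDay (d : Option Int) (m : Option Int) (y : Option Int) : Prop :=
  match d, m with
  | some dv, some mv =>
      dv < -10 ∨ 60 < dv ∨
      (if dv < 1 then mv ≤ 13 ∧ (2 ≤ mv ∨ y ≠ none)
       else 1 ≤ mv ∧ mv ≤ 12 ∧ (y ≠ none ∨ ¬(mv = 12 ∧ 31 < dv)))
  | _, _ => True
instance (d : Option Int) (m : Option Int) (y : Option Int) : Decidable (Pre_BoundDay d m y) := by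
  unfold Pre_BoundDay; rcases d with _ | dv <;> rcases m with _ | mv <;> infer_instance
def pvWitness_BoundDay : Option Int × Option Int × Option Int := (some 45, some 3, some 1950)

-- For day < 1 with month ≤ 0, A borrows into December and subtracts exactly one
-- year no matter how far below 1 the month is, while B's calendar arithmetic
-- returns the true preceding month and year (e.g. month 0 day 0 ↦ the last day
-- of November of the previous year), which is the intended normalization.
def D_BoundDay (d : Option Int) (m : Option Int) (y : Option Int) : Prop :=
  (d.any (fun dv => decide (-10 ≤ dv ∧ dv < 1)) && m.any (fun mv => decide (mv ≤ 0))) = true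
instance (d : Option Int) (m : Option Int) (y : Option Int) : Decidable (D_BoundDay d m y) := by
  unfold D_BoundDay; infer_instance

def Spec_BoundDay (d : Option Int) (m : Option Int) (y : Option Int) (out : Option Int × Option Int × Option Int) : Prop := ¬ D_BoundDay d m y → out = BoundDay_alt d m y
instance (d : Option Int) (m : Option Int) (y : Option Int) (out : Option Int × Option Int × Option Int) : Decidable (Spec_BoundDay d m y out) := by unfold Spec_BoundDay; infer_instance

def pvDiffWitness_BoundDay : Option Int × Option Int × Option Int := (some 0, some 0, some 2000)
def pvDiffWitnessOut_BoundDay : (Option Int × Option Int × Option Int) × (Option Int × Option Int × Option Int) :=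
  ((some 31, some 12, some 1999), (some 30, some 11, some 1999))

-- ===== CLAIM (what is proved, stated in full; the proofs are below) =====
def Claim_unchanged_BoundDay : Prop := ∀ (d : Option Int) (m : Option Int) (y : Option Int), Dom_BoundDay d m y → Pre_BoundDay d m y → Spec_BoundDay d m y (BoundDay d m y)
def Claim_changed_BoundDay : Prop := Dom_BoundDay (pvDiffWitness_BoundDay.1) (pvDiffWitness_BoundDay.2.1) (pvDiffWitness_BoundDay.2.2) ∧ Pre_BoundDay (pvDiffWitness_BoundDay.1) (pvDiffWitness_BoundDay.2.1) (pvDiffWitness_BoundDay.2.2) ∧ D_BoundDay (pvDiffWitness_BoundDay.1) (pvDiffWitness_BoundDay.2.1) (pvDiffWitness_BoundDay.2.2) ∧ BoundDay (pvDiffWitness_BoundDay.1) (pvDiffWitness_BoundDay.2.1) (pvDiffWitness_BoundDay.2.2) = pvDiffWitnessOut_BoundDay.1 ∧ BoundDay_alt (pvDiffWitness_BoundDay.1) (pvDiffWitness_BoundDay.2.1) (pvDiffWitness_BoundDay.2.2) = pvDiffWitnessOut_BoundDay.2 ∧ pvDiffWitnessOut_BoundDay.1 ≠ pvDiffWitn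essOut_BoundDay.2
def Claim_exact_BoundDay : Prop := ∀ (d : Option Int) (m : Option Int) (y : Option Int), Dom_BoundDay d m y → Pre_BoundDay d m y → D_BoundDay d m y → BoundDay d m y ≠ BoundDay_alt d m y

-- ===== LEMMAS AND PROOFS =====

-- The year flows through A's borrow loop as a pure shift: running at year b+δ is
-- running at year b with the output year shifted by δ.
theorem negLoopA_add (f : Nat) : ∀ (d m b δ : Int),
    negLoopA f d m (some (b + δ)) =
      ((negLoopA f d m (some b)).1, (negLoopA f d m (some b)).2.1,
       (negLoopA f d m (some b)).2.2.map (fun w => w + δ)) := by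
  induction f with
  | zero =>
    intro d m b δ
    simp only [negLoopA, Option.map_some]
  | succ f ih =>
    intro d m b δ
    by_cases hd : d < 1
    · simp only [negLoopA, if_pos hd]
      by_cases hm : m - 1 < 1
      · simp only [if_pos hm, Option.map_some]
        have : b + δ - 1 = (b - 1) + δ := by ring
        rw [this]
        exact ih _ _ _ _
      · simp only [if_neg hm]
        exact ih _ _ _ _
    · simp only [negLoopA, if_neg hd, Option.map_some]

theorem posLoopA_add (f : Nat) : ∀ (d m b δ : Int),
    posLoopA f d m (some (b + δ)) =
      ((posLoopA f d m (some b)).1, (posLoopA f d m (some b)).2.1,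
       (posLoopA f d m (some b)).2.2.map (fun w => w + δ)) := by
  induction f with
  | zero =>
    intro d m b δ
    simp only [posLoopA, Option.map_some]
  | succ f ih =>
    intro d m b δ
    by_cases hd : d > monthLength m
    · simp only [posLoopA, if_pos hd]
      by_cases hm : m + 1 > 12
      · simp only [if_pos hm, Option.map_some]
        have : b + δ + 1 = (b + 1) + δ := by ring
        rw [this]
        exact ih _ _ _ _
      · simp only [if_neg hm]
        exact ih _ _ _ _
    · simp only [posLoopA, if_neg hd, Option.map_some]

theorem negLoopA_none (f : Nat) : ∀ (d m : Int),
    negLoopA f d m none =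
      ((negLoopA f d m (some 0)).1, (negLoopA f d m (some 0)).2.1, none) := by
  induction f with
  | zero => intro d m; simp only [negLoopA]
  | succ f ih =>
    intro d m
    by_cases hd : d < 1
    · simp only [negLoopA, if_pos hd]
      by_cases hm : m - 1 < 1
      · simp only [if_pos hm, Option.map_none, Option.map_some]
        rw [ih]
        have h := negLoopA_add f (d + monthLength 12) 12 0 (-1)
        rw [show (0 : Int) + -1 = 0 - 1 by ring] at h
        rw [h]
      · simp only [if_neg hm]
        exact ih _ _
    · simp only [negLoopA, if_neg hd]

theorem posLoopA_none (f : Nat) : ∀ (d m : Int),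
    posLoopA f d m none =
      ((posLoopA f d m (some 0)).1, (posLoopA f d m (some 0)).2.1, none) := by
  induction f with
  | zero => intro d m; simp only [posLoopA]
  | succ f ih =>
    intro d m
    by_cases hd : d > monthLength m
    · simp only [posLoopA, if_pos hd]
      by_cases hm : m + 1 > 12
      · simp only [if_pos hm, Option.map_none, Option.map_some]
        rw [ih]
        have h := posLoopA_add f (d - monthLength m) 1 0 1
        rw [show (0 : Int) + 1 = 0 + 1 by ring] at h
        rw [h]
      · simp only [if_neg hm]
        exact ih _ _
    · simp only [posLoopA, if_neg hd]

-- Both complete programs factor the year out the same way.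
theorem A_mapYear (dv mv v : Int) (h : ¬(dv < -10 ∨ dv > 60)) :
    BoundDay (some dv) (some mv) (some v) =
      ((BoundDay (some dv) (some mv) (some 0)).1,
       (BoundDay (some dv) (some mv) (some 0)).2.1,
       (BoundDay (some dv) (some mv) (some 0)).2.2.map (fun w => w + v)) := by
  unfold BoundDay
  by_cases h1 : 1 ≤ dv ∧ dv ≤ monthLength mv
  · simp [if_neg h, if_pos h1]
  · by_cases h2 : dv < 1
    · simp only [if_neg h, if_neg h1, if_pos h2]
      simpa using negLoopA_add 100 dv mv 0 v
    · simp only [if_neg h, if_neg h1, if_neg h2]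
      simpa using posLoopA_add 100 dv mv 0 v

theorem A_noneYear (dv mv : Int) (h : ¬(dv < -10 ∨ dv > 60)) :
    BoundDay (some dv) (some mv) none =
      ((BoundDay (some dv) (some mv) (some 0)).1,
       (BoundDay (some dv) (some mv) (some 0)).2.1, none) := by
  unfold BoundDay
  by_cases h1 : 1 ≤ dv ∧ dv ≤ monthLength mv
  · simp [if_neg h, if_pos h1]
  · by_cases h2 : dv < 1
    · simp only [if_neg h, if_neg h1, if_pos h2]
      simpa using negLoopA_none 100 dv mv
    · simp only [if_neg h, if_neg h1, if_neg h2]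
      simpa using posLoopA_none 100 dv mv

theorem alt_mapYear (dv mv v : Int) (h : ¬(dv < -10 ∨ dv > 60)) :
    BoundDay_alt (some dv) (some mv) (some v) =
      ((BoundDay_alt (some dv) (some mv) (some 0)).1,
       (BoundDay_alt (some dv) (some mv) (some 0)).2.1,
       (BoundDay_alt (some dv) (some mv) (some 0)).2.2.map (fun w => w + v)) := by
  simp only [BoundDay_alt, if_neg h, Option.map_some, Prod.mk.injEq, Option.some.injEq]
  exact ⟨trivial, trivial, by ring⟩

theorem alt_noneYear (dv mv : Int) (h : ¬(dv < -10 ∨ dv > 60)) :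
    BoundDay_alt (some dv) (some mv) none =
      ((BoundDay_alt (some dv) (some mv) (some 0)).1,
       (BoundDay_alt (some dv) (some mv) (some 0)).2.1, none) := by
  simp only [BoundDay_alt, if_neg h, Option.map_none, Option.map_some]

-- With the year fixed at 0 the remaining data is finite: day in -10..60, month
-- in 1..13 (month 13 only reachable with day < 1 under Pre_).
theorem key : ∀ i ∈ List.range 71, ∀ j ∈ List.range 13,
    ((i : Int) - 10 < 1 ∨ (j : Int) + 1 ≤ 12) →
    BoundDay (some ((i : Int) - 10)) (some ((j : Int) + 1)) (some 0) =
      BoundDay_alt (some ((i : Int) - 10)) (some ((j : Int) + 1)) (some 0) := by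
  decide

theorem key' (dv mv : Int) (hd1 : -10 ≤ dv) (hd2 : dv ≤ 60) (hm1 : 1 ≤ mv) (hm2 : mv ≤ 13)
    (hc : dv < 1 ∨ mv ≤ 12) :
    BoundDay (some dv) (some mv) (some 0) = BoundDay_alt (some dv) (some mv) (some 0) := by
  have h := key (dv + 10).toNat (by simp [List.mem_range]; omega) (mv - 1).toNat
    (by simp [List.mem_range]; omega)
  have e1 : ((dv + 10).toNat : Int) - 10 = dv := by omega
  have e2 : ((mv - 1).toNat : Int) + 1 = mv := by omega
  rw [e1, e2] at h
  exact h (by omega)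


-- Inside D_: A takes exactly one borrow step, landing on December of y-1.
theorem negLoopA_borrow (f : Nat) (d m : Int) (y : Option Int) (hd : d < 1) (hm : m - 1 < 1) :
    negLoopA (f + 1) d m y = negLoopA f (d + 31) 12 (y.map (fun v => v - 1)) := by
  simp only [negLoopA, if_pos hd, if_pos hm]
  norm_num [monthLength]

theorem negLoopA_stop (f : Nat) (d m : Int) (y : Option Int) (hd : ¬ d < 1) :
    negLoopA (f + 1) d m y = (some d, some m, y) := by
  simp only [negLoopA, if_neg hd]

theorem evalA_D (dv mv v : Int) (h1 : -10 ≤ dv) (h2 : dv < 1) (h3 : mv ≤ 0) :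
    BoundDay (some dv) (some mv) (some v) = (some (dv + 31), some 12, some (v - 1)) := by
  simp only [BoundDay]
  rw [if_neg (by omega), if_neg (fun h => absurd h.1 (by omega)), if_pos h2]
  rw [show (100 : Nat) = 99 + 1 from rfl, negLoopA_borrow 99 dv mv (some v) h2 (by omega)]
  rw [show (99 : Nat) = 98 + 1 from rfl, negLoopA_stop 98 (dv + 31) 12 _ (by omega)]
  simp

-- ===== VERDICT (by name: the statement is the Claim_ definition above) =====
theorem BoundDay_spec : Claim_unchanged_BoundDay := by
  intro d m y _ hpre hnd
  rcases d with _ | dv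
  · rfl
  rcases m with _ | mv
  · rfl
  by_cases hout : dv < -10 ∨ dv > 60
  · show BoundDay _ _ _ = BoundDay_alt _ _ _
    unfold BoundDay BoundDay_alt
    simp only [if_pos hout]
  · have hdm : -10 ≤ dv ∧ dv ≤ 60 := by omega
    have hbounds : 1 ≤ mv ∧ mv ≤ 13 ∧ (dv < 1 ∨ mv ≤ 12) := by
      unfold Pre_BoundDay at hpre
      unfold D_BoundDay at hnd
      simp only [Option.any_some, Bool.and_eq_true, decide_eq_true_eq] at hnd
      have hX := hpre.resolve_left (by omega) |>.resolve_left (by omega)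
      by_cases hd1 : dv < 1
      · rw [if_pos hd1] at hX
        exact ⟨by omega, hX.1, Or.inl hd1⟩
      · rw [if_neg hd1] at hX
        exact ⟨hX.1, by omega, Or.inr hX.2.1⟩
    have hk := key' dv mv hdm.1 hdm.2 hbounds.1 hbounds.2.1 hbounds.2.2
    rcases y with _ | v
    · rw [A_noneYear dv mv hout, alt_noneYear dv mv hout, hk]
    · rw [A_mapYear dv mv v hout, alt_mapYear dv mv v hout, hk]

theorem BoundDay_changed : Claim_changed_BoundDay := by
  unfold Claim_changed_BoundDay; decide

theorem BoundDay_tight : Claim_exact_BoundDay := by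
  unfold Claim_exact_BoundDay
  intro d m y _ hpre hD
  unfold D_BoundDay at hD
  rcases d with _ | dv
  · simp at hD
  rcases m with _ | mv
  · simp at hD
  simp only [Option.any_some, Bool.and_eq_true, decide_eq_true_eq] at hD
  obtain ⟨⟨hd1, hd2⟩, hmv⟩ := hD
  unfold Pre_BoundDay at hpre
  have hy : y ≠ none := by
    rcases hpre with h | h | h
    · omega
    · omega
    · rw [if_pos hd2] at h
      rcases h.2 with h2 | h2
      · omega
      · exact h2
  rcases y with _ | v
  · exact absurd rfl hy
  rw [evalA_D dv mv v hd1 hd2 hmv]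
  simp only [BoundDay_alt, resolveB]
  rw [if_neg (by omega)]
  set q := PySem.Int.floordiv (mv - 1) 12 with hq
  set r := PySem.Int.mod (mv - 1) 12 with hr
  have hqr : q * 12 + r = mv - 1 := PySem.Int.floordiv_mul_add_mod (mv - 1) 12
  have hr0 : 0 ≤ r := PySem.Int.mod_nonneg (mv - 1) (by norm_num)
  have hr12 : r < 12 := PySem.Int.mod_lt (mv - 1) (by norm_num)
  have hqneg : q ≤ -1 := by omega
  have hcases : r = 0 ∨ r = 1 ∨ r = 2 ∨ r = 3 ∨ r = 4 ∨ r = 5 ∨ r = 6 ∨ r = 7 ∨ r = 8 ∨ r = 9 ∨ r = 10 ∨ r = 11 := by omega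
  rcases hcases with hk | hk | hk | hk | hk | hk | hk | hk | hk | hk | hk | hk
  · rw [hk]
    rw [show (PySem.List.pyGet? cumB ((0 : Int))).getD 0 = ((0 : Int)) from by decide]
    have hshift : PySem.Int.floordiv (365 * q + 0 + dv - 1) 365 = q - 1 := by
      rw [PySem.Int.floordiv_eq_iff_of_pos (by norm_num)]
      omega
    have hmod : PySem.Int.mod (365 * q + 0 + dv - 1) 365 = 0 + dv - 1 + 365 := by
      have h2 := PySem.Int.floordiv_mul_add_mod (365 * q + 0 + dv - 1) 365
      rw [hshift] at h2
      omega
    rw [hshift, hmod]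
    have hcount : cumB.foldl (fun a c => a + if c ≤ 0 + dv - 1 + 365 then 1 else 0) (0 : Int) = (12 : Int) := by
      simp only [cumB, List.foldl_cons, List.foldl_nil]
      rw [if_pos (by omega)]
      rw [if_pos (by omega)]
      rw [if_pos (by omega)]
      rw [if_pos (by omega)]
      rw [if_pos (by omega)]
      rw [if_pos (by omega)]
      rw [if_pos (by omega)]
      rw [if_pos (by omega)]
      rw [if_pos (by omega)]
      rw [if_pos (by omega)]
      rw [if_pos (by omega)]
      rw [if_pos (by omega)]
      try norm_num
    rw [hcount]
    intro heq
    have h3 := congrArg (fun p => p.2.2) heq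
    simp at h3
    omega
  · rw [hk]
    rw [show (PySem.List.pyGet? cumB ((1 : Int))).getD 0 = ((31 : Int)) from by decide]
    have hshift : PySem.Int.floordiv (365 * q + 31 + dv - 1) 365 = q := by
      rw [PySem.Int.floordiv_eq_iff_of_pos (by norm_num)]
      omega
    have hmod : PySem.Int.mod (365 * q + 31 + dv - 1) 365 = 31 + dv - 1 := by
      have h2 := PySem.Int.floordiv_mul_add_mod (365 * q + 31 + dv - 1) 365
      rw [hshift] at h2
      omega
    rw [hshift, hmod]
    have hcount : cumB.foldl (fun a c => a + if c ≤ 31 + dv - 1 then 1 else 0) (0 : Int) = (1 : Int) := by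
      simp only [cumB, List.foldl_cons, List.foldl_nil]
      rw [if_pos (by omega)]
      rw [if_neg (by omega)]
      rw [if_neg (by omega)]
      rw [if_neg (by omega)]
      rw [if_neg (by omega)]
      rw [if_neg (by omega)]
      rw [if_neg (by omega)]
      rw [if_neg (by omega)]
      rw [if_neg (by omega)]
      rw [if_neg (by omega)]
      rw [if_neg (by omega)]
      rw [if_neg (by omega)]
      try norm_num
    rw [hcount]
    intro heq
    have h2 := congrArg (fun p => p.2.1) heq
    simp at h2
  · rw [hk]
    rw [show (PySem.List.pyGet? cumB ((2 : Int))).getD 0 = ((59 : Int)) from by decide]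
    have hshift : PySem.Int.floordiv (365 * q + 59 + dv - 1) 365 = q := by
      rw [PySem.Int.floordiv_eq_iff_of_pos (by norm_num)]
      omega
    have hmod : PySem.Int.mod (365 * q + 59 + dv - 1) 365 = 59 + dv - 1 := by
      have h2 := PySem.Int.floordiv_mul_add_mod (365 * q + 59 + dv - 1) 365
      rw [hshift] at h2
      omega
    rw [hshift, hmod]
    have hcount : cumB.foldl (fun a c => a + if c ≤ 59 + dv - 1 then 1 else 0) (0 : Int) = (2 : Int) := by
      simp only [cumB, List.foldl_cons, List.foldl_nil]
      rw [if_pos (by omega)]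
      rw [if_pos (by omega)]
      rw [if_neg (by omega)]
      rw [if_neg (by omega)]
      rw [if_neg (by omega)]
      rw [if_neg (by omega)]
      rw [if_neg (by omega)]
      rw [if_neg (by omega)]
      rw [if_neg (by omega)]
      rw [if_neg (by omega)]
      rw [if_neg (by omega)]
      rw [if_neg (by omega)]
      try norm_num
    rw [hcount]
    intro heq
    have h2 := congrArg (fun p => p.2.1) heq
    simp at h2
  · rw [hk]
    rw [show (PySem.List.pyGet? cumB ((3 : Int))).getD 0 = ((90 : Int)) from by decide]
    have hshift : PySem.Int.floordiv (365 * q + 90 + dv - 1) 365 = q := by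
      rw [PySem.Int.floordiv_eq_iff_of_pos (by norm_num)]
      omega
    have hmod : PySem.Int.mod (365 * q + 90 + dv - 1) 365 = 90 + dv - 1 := by
      have h2 := PySem.Int.floordiv_mul_add_mod (365 * q + 90 + dv - 1) 365
      rw [hshift] at h2
      omega
    rw [hshift, hmod]
    have hcount : cumB.foldl (fun a c => a + if c ≤ 90 + dv - 1 then 1 else 0) (0 : Int) = (3 : Int) := by
      simp only [cumB, List.foldl_cons, List.foldl_nil]
      rw [if_pos (by omega)]
      rw [if_pos (by omega)]
      rw [if_pos (by omega)]
      rw [if_neg (by omega)]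
      rw [if_neg (by omega)]
      rw [if_neg (by omega)]
      rw [if_neg (by omega)]
      rw [if_neg (by omega)]
      rw [if_neg (by omega)]
      rw [if_neg (by omega)]
      rw [if_neg (by omega)]
      rw [if_neg (by omega)]
      try norm_num
    rw [hcount]
    intro heq
    have h2 := congrArg (fun p => p.2.1) heq
    simp at h2
  · rw [hk]
    rw [show (PySem.List.pyGet? cumB ((4 : Int))).getD 0 = ((120 : Int)) from by decide]
    have hshift : PySem.Int.floordiv (365 * q + 120 + dv - 1) 365 = q := by
      rw [PySem.Int.floordiv_eq_iff_of_pos (by norm_num)]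
      omega
    have hmod : PySem.Int.mod (365 * q + 120 + dv - 1) 365 = 120 + dv - 1 := by
      have h2 := PySem.Int.floordiv_mul_add_mod (365 * q + 120 + dv - 1) 365
      rw [hshift] at h2
      omega
    rw [hshift, hmod]
    have hcount : cumB.foldl (fun a c => a + if c ≤ 120 + dv - 1 then 1 else 0) (0 : Int) = (4 : Int) := by
      simp only [cumB, List.foldl_cons, List.foldl_nil]
      rw [if_pos (by omega)]
      rw [if_pos (by omega)]
      rw [if_pos (by omega)]
      rw [if_pos (by omega)]
      rw [if_neg (by omega)]
      rw [if_neg (by omega)]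
      rw [if_neg (by omega)]
      rw [if_neg (by omega)]
      rw [if_neg (by omega)]
      rw [if_neg (by omega)]
      rw [if_neg (by omega)]
      rw [if_neg (by omega)]
      try norm_num
    rw [hcount]
    intro heq
    have h2 := congrArg (fun p => p.2.1) heq
    simp at h2
  · rw [hk]
    rw [show (PySem.List.pyGet? cumB ((5 : Int))).getD 0 = ((151 : Int)) from by decide]
    have hshift : PySem.Int.floordiv (365 * q + 151 + dv - 1) 365 = q := by
      rw [PySem.Int.floordiv_eq_iff_of_pos (by norm_num)]
      omega
    have hmod : PySem.Int.mod (365 * q + 151 + dv - 1) 365 = 151 + dv - 1 := by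
      have h2 := PySem.Int.floordiv_mul_add_mod (365 * q + 151 + dv - 1) 365
      rw [hshift] at h2
      omega
    rw [hshift, hmod]
    have hcount : cumB.foldl (fun a c => a + if c ≤ 151 + dv - 1 then 1 else 0) (0 : Int) = (5 : Int) := by
      simp only [cumB, List.foldl_cons, List.foldl_nil]
      rw [if_pos (by omega)]
      rw [if_pos (by omega)]
      rw [if_pos (by omega)]
      rw [if_pos (by omega)]
      rw [if_pos (by omega)]
      rw [if_neg (by omega)]
      rw [if_neg (by omega)]
      rw [if_neg (by omega)]
      rw [if_neg (by omega)]
      rw [if_neg (by omega)]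
      rw [if_neg (by omega)]
      rw [if_neg (by omega)]
      try norm_num
    rw [hcount]
    intro heq
    have h2 := congrArg (fun p => p.2.1) heq
    simp at h2
  · rw [hk]
    rw [show (PySem.List.pyGet? cumB ((6 : Int))).getD 0 = ((181 : Int)) from by decide]
    have hshift : PySem.Int.floordiv (365 * q + 181 + dv - 1) 365 = q := by
      rw [PySem.Int.floordiv_eq_iff_of_pos (by norm_num)]
      omega
    have hmod : PySem.Int.mod (365 * q + 181 + dv - 1) 365 = 181 + dv - 1 := by
      have h2 := PySem.Int.floordiv_mul_add_mod (365 * q + 181 + dv - 1) 365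
      rw [hshift] at h2
      omega
    rw [hshift, hmod]
    have hcount : cumB.foldl (fun a c => a + if c ≤ 181 + dv - 1 then 1 else 0) (0 : Int) = (6 : Int) := by
      simp only [cumB, List.foldl_cons, List.foldl_nil]
      rw [if_pos (by omega)]
      rw [if_pos (by omega)]
      rw [if_pos (by omega)]
      rw [if_pos (by omega)]
      rw [if_pos (by omega)]
      rw [if_pos (by omega)]
      rw [if_neg (by omega)]
      rw [if_neg (by omega)]
      rw [if_neg (by omega)]
      rw [if_neg (by omega)]
      rw [if_neg (by omega)]
      rw [if_neg (by omega)]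
      try norm_num
    rw [hcount]
    intro heq
    have h2 := congrArg (fun p => p.2.1) heq
    simp at h2
  · rw [hk]
    rw [show (PySem.List.pyGet? cumB ((7 : Int))).getD 0 = ((212 : Int)) from by decide]
    have hshift : PySem.Int.floordiv (365 * q + 212 + dv - 1) 365 = q := by
      rw [PySem.Int.floordiv_eq_iff_of_pos (by norm_num)]
      omega
    have hmod : PySem.Int.mod (365 * q + 212 + dv - 1) 365 = 212 + dv - 1 := by
      have h2 := PySem.Int.floordiv_mul_add_mod (365 * q + 212 + dv - 1) 365
      rw [hshift] at h2
      omega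
    rw [hshift, hmod]
    have hcount : cumB.foldl (fun a c => a + if c ≤ 212 + dv - 1 then 1 else 0) (0 : Int) = (7 : Int) := by
      simp only [cumB, List.foldl_cons, List.foldl_nil]
      rw [if_pos (by omega)]
      rw [if_pos (by omega)]
      rw [if_pos (by omega)]
      rw [if_pos (by omega)]
      rw [if_pos (by omega)]
      rw [if_pos (by omega)]
      rw [if_pos (by omega)]
      rw [if_neg (by omega)]
      rw [if_neg (by omega)]
      rw [if_neg (by omega)]
      rw [if_neg (by omega)]
      rw [if_neg (by omega)]
      try norm_num
    rw [hcount]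
    intro heq
    have h2 := congrArg (fun p => p.2.1) heq
    simp at h2
  · rw [hk]
    rw [show (PySem.List.pyGet? cumB ((8 : Int))).getD 0 = ((243 : Int)) from by decide]
    have hshift : PySem.Int.floordiv (365 * q + 243 + dv - 1) 365 = q := by
      rw [PySem.Int.floordiv_eq_iff_of_pos (by norm_num)]
      omega
    have hmod : PySem.Int.mod (365 * q + 243 + dv - 1) 365 = 243 + dv - 1 := by
      have h2 := PySem.Int.floordiv_mul_add_mod (365 * q + 243 + dv - 1) 365
      rw [hshift] at h2
      omega
    rw [hshift, hmod]
    have hcount : cumB.foldl (fun a c => a + if c ≤ 243 + dv - 1 then 1 else 0) (0 : Int) = (8 : Int) := by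
      simp only [cumB, List.foldl_cons, List.foldl_nil]
      rw [if_pos (by omega)]
      rw [if_pos (by omega)]
      rw [if_pos (by omega)]
      rw [if_pos (by omega)]
      rw [if_pos (by omega)]
      rw [if_pos (by omega)]
      rw [if_pos (by omega)]
      rw [if_pos (by omega)]
      rw [if_neg (by omega)]
      rw [if_neg (by omega)]
      rw [if_neg (by omega)]
      rw [if_neg (by omega)]
      try norm_num
    rw [hcount]
    intro heq
    have h2 := congrArg (fun p => p.2.1) heq
    simp at h2
  · rw [hk]
    rw [show (PySem.List.pyGet? cumB ((9 : Int))).getD 0 = ((273 : Int)) from by decide]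
    have hshift : PySem.Int.floordiv (365 * q + 273 + dv - 1) 365 = q := by
      rw [PySem.Int.floordiv_eq_iff_of_pos (by norm_num)]
      omega
    have hmod : PySem.Int.mod (365 * q + 273 + dv - 1) 365 = 273 + dv - 1 := by
      have h2 := PySem.Int.floordiv_mul_add_mod (365 * q + 273 + dv - 1) 365
      rw [hshift] at h2
      omega
    rw [hshift, hmod]
    have hcount : cumB.foldl (fun a c => a + if c ≤ 273 + dv - 1 then 1 else 0) (0 : Int) = (9 : Int) := by
      simp only [cumB, List.foldl_cons, List.foldl_nil]
      rw [if_pos (by omega)]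
      rw [if_pos (by omega)]
      rw [if_pos (by omega)]
      rw [if_pos (by omega)]
      rw [if_pos (by omega)]
      rw [if_pos (by omega)]
      rw [if_pos (by omega)]
      rw [if_pos (by omega)]
      rw [if_pos (by omega)]
      rw [if_neg (by omega)]
      rw [if_neg (by omega)]
      rw [if_neg (by omega)]
      try norm_num
    rw [hcount]
    intro heq
    have h2 := congrArg (fun p => p.2.1) heq
    simp at h2
  · rw [hk]
    rw [show (PySem.List.pyGet? cumB ((10 : Int))).getD 0 = ((304 : Int)) from by decide]
    have hshift : PySem.Int.floordiv (365 * q + 304 + dv - 1) 365 = q := by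
      rw [PySem.Int.floordiv_eq_iff_of_pos (by norm_num)]
      omega
    have hmod : PySem.Int.mod (365 * q + 304 + dv - 1) 365 = 304 + dv - 1 := by
      have h2 := PySem.Int.floordiv_mul_add_mod (365 * q + 304 + dv - 1) 365
      rw [hshift] at h2
      omega
    rw [hshift, hmod]
    have hcount : cumB.foldl (fun a c => a + if c ≤ 304 + dv - 1 then 1 else 0) (0 : Int) = (10 : Int) := by
      simp only [cumB, List.foldl_cons, List.foldl_nil]
      rw [if_pos (by omega)]
      rw [if_pos (by omega)]
      rw [if_pos (by omega)]
      rw [if_pos (by omega)]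
      rw [if_pos (by omega)]
      rw [if_pos (by omega)]
      rw [if_pos (by omega)]
      rw [if_pos (by omega)]
      rw [if_pos (by omega)]
      rw [if_pos (by omega)]
      rw [if_neg (by omega)]
      rw [if_neg (by omega)]
      try norm_num
    rw [hcount]
    intro heq
    have h2 := congrArg (fun p => p.2.1) heq
    simp at h2
  · rw [hk]
    rw [show (PySem.List.pyGet? cumB ((11 : Int))).getD 0 = ((334 : Int)) from by decide]
    have hshift : PySem.Int.floordiv (365 * q + 334 + dv - 1) 365 = q := by
      rw [PySem.Int.floordiv_eq_iff_of_pos (by norm_num)]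
      omega
    have hmod : PySem.Int.mod (365 * q + 334 + dv - 1) 365 = 334 + dv - 1 := by
      have h2 := PySem.Int.floordiv_mul_add_mod (365 * q + 334 + dv - 1) 365
      rw [hshift] at h2
      omega
    rw [hshift, hmod]
    have hcount : cumB.foldl (fun a c => a + if c ≤ 334 + dv - 1 then 1 else 0) (0 : Int) = (11 : Int) := by
      simp only [cumB, List.foldl_cons, List.foldl_nil]
      rw [if_pos (by omega)]
      rw [if_pos (by omega)]
      rw [if_pos (by omega)]
      rw [if_pos (by omega)]
      rw [if_pos (by omega)]
      rw [if_pos (by omega)]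
      rw [if_pos (by omega)]
      rw [if_pos (by omega)]
      rw [if_pos (by omega)]
      rw [if_pos (by omega)]
      rw [if_pos (by omega)]
      rw [if_neg (by omega)]
      try norm_num
    rw [hcount]
    intro heq
    have h2 := congrArg (fun p => p.2.1) heq
    simp at h2
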